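-- pv_equiv track=rewrite | github.com/aniimura/ABC | research/computational/abc_large_search.py | rad_from_spf
-- ===== SOURCE A (Python) =====
-- def rad_from_spf(n, spf):
--     """最小素因数テーブルを用いた高速 rad(n) 計算"""
--     if n <= 1:
--         return 1
--     result = 1
--     temp = n
--     while temp > 1:
--         p = spf[temp]
--         result *= p
--         while temp % p == 0:
--             temp //= p
--     return result
-- ===== SOURCE B (Python) =====
-- def rad_from_spf(n, spf):
--     """rad(n) by direct trial division up to sqrt(n) (the spf table is not needed)"""
--     if n <= 1:
--         return 1
--     result = 1
--     temp = n
--     d = 2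
--     while d * d <= temp:
--         if temp % d == 0:
--             result *= d
--             while temp % d == 0:
--                 temp //= d
--         d += 1
--     if temp > 1:
--         result *= temp
--     return result
-- ===== Notes on version B (the rewrite author's own statement) =====
-- stated objective: alternative
-- what changed: B computes rad(n) by classic trial division up to sqrt(temp) (dividing out each found divisor and multiplying in the leftover prime), instead of A's walk down the smallest-prime-factor table; B never reads spf.
-- outside the precondition, e.g. on rad_from_spf(12, [0, 0, 2, 3, 2, 5, 2, 7, 2, 3, 2, 11, 4]): A returns 12, B returns 6
import Mathlib
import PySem

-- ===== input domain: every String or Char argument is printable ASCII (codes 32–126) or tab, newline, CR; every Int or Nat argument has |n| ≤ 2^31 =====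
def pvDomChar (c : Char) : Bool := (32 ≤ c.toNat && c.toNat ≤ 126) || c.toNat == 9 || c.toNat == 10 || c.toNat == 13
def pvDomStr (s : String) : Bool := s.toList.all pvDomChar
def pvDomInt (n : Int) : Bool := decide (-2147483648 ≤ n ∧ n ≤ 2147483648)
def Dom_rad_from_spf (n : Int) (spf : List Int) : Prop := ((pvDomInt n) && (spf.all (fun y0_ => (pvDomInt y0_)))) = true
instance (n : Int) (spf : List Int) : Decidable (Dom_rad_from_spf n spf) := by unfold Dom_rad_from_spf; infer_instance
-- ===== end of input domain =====

-- B computes rad(n) by trial division up to sqrt(temp) instead of A's SPF-table walk;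
-- equivalence is proved on valid SPF tables covering n (Pre_).

-- ===== PORT A =====
-- inner 'while temp % p == 0: temp //= p'; fuel bounds the iteration count, never reached inside Pre_
def pvDivOut (fuel : Nat) (p temp : Int) : Int :=
  match fuel with
  | 0 => temp
  | f + 1 => if PySem.Int.mod temp p = 0 then pvDivOut f p (PySem.Int.floordiv temp p) else temp

-- outer 'while temp > 1' loop of A; on an IndexError index (pyGet? = none) the port stops (outside Pre_)
def pvLoopA (fuel : Nat) (spf : List Int) (result temp : Int) : Int :=
  match fuel with
  | 0 => result
  | f + 1 =>
    if 1 < temp then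
      match PySem.List.pyGet? spf temp with
      | none => result
      | some p => pvLoopA f spf (result * p) (pvDivOut temp.toNat p temp)
    else result

def rad_from_spf (n : Int) (spf : List Int) : Int :=
  if n ≤ 1 then 1 else pvLoopA n.toNat spf 1 n

-- ===== PORT B =====
-- 'while d * d <= temp' trial-division loop of B; the inner divide-out loop is the same
-- 'while temp % d == 0: temp //= d' as in A, so pvDivOut is reused for it.
-- Returns the pair (result, temp) the loop leaves behind.
def pvLoopT (fuel : Nat) (result d temp : Int) : Int × Int :=
  match fuel with
  | 0 => (result, temp)
  | f + 1 =>
    if d * d ≤ temp then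
      if PySem.Int.mod temp d = 0 then
        pvLoopT f (result * d) (d + 1) (pvDivOut temp.toNat d temp)
      else pvLoopT f (result) (d + 1) temp
    else (result, temp)

-- trailing 'if temp > 1: result *= temp; return result' of B
def pvFinish (p : Int × Int) : Int := if 1 < p.2 then p.1 * p.2 else p.1

def rad_from_spf_alt (n : Int) (spf : List Int) : Int :=
  if n ≤ 1 then 1 else pvFinish (pvLoopT n.toNat 1 2 n)

-- ===== PRECONDITION & SPEC =====
-- Pre_ restricts to the function's natural domain: a genuine smallest-prime-factor table
-- (spf[i] = minFac i for 2 ≤ i < len) covering n.  On malformed tables A raises or loops forever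
-- on most inputs, and where it does return (a non-minimal divisor table), the value is an
-- accident of which divisors get stripped and the two programs may legitimately disagree.
def Pre_rad_from_spf (n : Int) (spf : List Int) : Prop :=
  n ≤ 1 ∨ (n < (spf.length : Int) ∧
    ∀ i : Nat, i < spf.length → 2 ≤ i →
      0 ≤ spf.getD i 0 ∧ 2 ≤ (spf.getD i 0).toNat ∧ (spf.getD i 0).toNat ∣ i ∧
        ∀ q : Nat, q < (spf.getD i 0).toNat → 2 ≤ q → ¬ q ∣ i)

instance (n : Int) (spf : List Int) : Decidable (Pre_rad_from_spf n spf) := by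
  unfold Pre_rad_from_spf; infer_instance

def pvWitness_rad_from_spf : Int × List Int := (12, [0, 0, 2, 3, 2, 5, 2, 7, 2, 3, 2, 11, 2])

def Spec_rad_from_spf (n : Int) (spf : List Int) (out : Int) : Prop := out = rad_from_spf_alt n spf
instance (n : Int) (spf : List Int) (out : Int) : Decidable (Spec_rad_from_spf n spf out) := by unfold Spec_rad_from_spf; infer_instance

-- ===== CLAIM (what is proved, stated in full; the proofs are below) =====
def Claim_equal_rad_from_spf : Prop := ∀ (n : Int) (spf : List Int), Dom_rad_from_spf n spf → Pre_rad_from_spf n spf → Spec_rad_from_spf n spf (rad_from_spf n spf)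

-- ===== LEMMAS AND PROOFS =====

-- reference: divide all factors p out of t
def stripAll (p t : Nat) : Nat :=
  if h : 2 ≤ p ∧ 0 < t ∧ p ∣ t then stripAll p (t / p) else t
  termination_by t
  decreasing_by
    exact Nat.div_lt_self h.2.1 (by omega)

lemma stripAll_of_dvd {p t : Nat} (hp : 2 ≤ p) (ht : 0 < t) (hd : p ∣ t) :
    stripAll p t = stripAll p (t / p) := by
  rw [stripAll]; simp [hp, ht, hd]

lemma stripAll_of_not_dvd {p t : Nat} (hd : ¬ p ∣ t) : stripAll p t = t := by
  rw [stripAll]; simp [hd]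

lemma mem_primeFactors_div {p t q : Nat} (hp : p.Prime) (hpt : p ∣ t) (ht : 0 < t)
    (hq : q ≠ p) : q ∈ (t / p).primeFactors ↔ q ∈ t.primeFactors := by
  have htp : 0 < t / p := Nat.div_pos (Nat.le_of_dvd ht hpt) hp.pos
  constructor
  · intro h
    rw [Nat.mem_primeFactors] at h ⊢
    exact ⟨h.1, h.2.1.trans (Nat.div_dvd_of_dvd hpt), by omega⟩
  · intro h
    rw [Nat.mem_primeFactors] at h ⊢
    refine ⟨h.1, ?_, by omega⟩
    have hcop : Nat.Coprime q p := (Nat.coprime_primes h.1 hp).mpr hq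
    have hqd : q ∣ (t / p) * p := by rw [Nat.div_mul_cancel hpt]; exact h.2.1
    exact hcop.dvd_of_dvd_mul_right hqd

lemma stripAll_pos {p t : Nat} (ht : 0 < t) : 0 < stripAll p t := by
  induction t using Nat.strong_induction_on with
  | _ t ih =>
    by_cases h : 2 ≤ p ∧ 0 < t ∧ p ∣ t
    · rw [stripAll_of_dvd h.1 h.2.1 h.2.2]
      have hlt : t / p < t := Nat.div_lt_self h.2.1 (by omega)
      exact ih _ hlt (Nat.div_pos (Nat.le_of_dvd ht h.2.2) (by omega))
    · rw [stripAll]; simp [h]; omega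

lemma stripAll_le {p t : Nat} : stripAll p t ≤ t := by
  induction t using Nat.strong_induction_on with
  | _ t ih =>
    by_cases h : 2 ≤ p ∧ 0 < t ∧ p ∣ t
    · rw [stripAll_of_dvd h.1 h.2.1 h.2.2]
      have hlt : t / p < t := Nat.div_lt_self h.2.1 (by omega)
      exact (ih _ hlt).trans (le_of_lt hlt)
    · rw [stripAll]; simp [h]

lemma stripAll_lt {p t : Nat} (hp : 2 ≤ p) (ht : 0 < t) (hd : p ∣ t) : stripAll p t < t := by
  rw [stripAll_of_dvd hp ht hd]
  have hlt : t / p < t := Nat.div_lt_self ht (by omega)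
  exact lt_of_le_of_lt stripAll_le hlt

lemma stripAll_primeFactors {p t : Nat} (hp : p.Prime) (ht : 0 < t) :
    (stripAll p t).primeFactors = t.primeFactors.erase p := by
  induction t using Nat.strong_induction_on with
  | _ t ih =>
    by_cases hd : p ∣ t
    · rw [stripAll_of_dvd hp.two_le ht hd]
      have hlt : t / p < t := Nat.div_lt_self ht hp.one_lt
      have htp : 0 < t / p := Nat.div_pos (Nat.le_of_dvd ht hd) hp.pos
      rw [ih _ hlt htp]
      ext q
      by_cases hq : q = p
      · simp [hq]
      · simp only [Finset.mem_erase, hq, ne_eq, not_false_eq_true, true_and]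
        exact mem_primeFactors_div hp hd ht hq
    · rw [stripAll_of_not_dvd hd]
      ext q
      by_cases hq : q = p
      · subst hq
        simp only [Finset.mem_erase, ne_eq, not_true_eq_false, false_and, iff_false]
        intro hmem
        exact hd (Nat.mem_primeFactors.mp hmem).2.1
      · simp [Finset.mem_erase, hq]

-- divOut computes stripAll (fuel t suffices)
lemma pvDivOut_eq_stripAll (fuel : Nat) : ∀ (t p : Nat), 2 ≤ p → 1 ≤ t → t ≤ fuel →
    pvDivOut fuel (p : Int) (t : Int) = (stripAll p t : Int) := by
  induction fuel with
  | zero => intro t p _ h1 h2; omega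
  | succ f ih =>
    intro t p hp h1 h2
    unfold pvDivOut
    by_cases hd : p ∣ t
    · have hm : PySem.Int.mod (t : Int) (p : Int) = 0 := by
        rw [PySem.Int.mod_eq_zero_iff_dvd]
        exact_mod_cast hd
      rw [if_pos hm, PySem.Int.floordiv_natCast]
      have htp : 1 ≤ t / p := Nat.div_pos (Nat.le_of_dvd (by omega) hd) (by omega)
      have hlt : t / p < t := Nat.div_lt_self (by omega) (by omega)
      rw [ih (t / p) p hp htp (by omega), stripAll_of_dvd hp (by omega) hd]
    · have hm : ¬ PySem.Int.mod (t : Int) (p : Int) = 0 := by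
        rw [PySem.Int.mod_eq_zero_iff_dvd]
        intro h
        exact hd (by exact_mod_cast h)
      rw [if_neg hm, stripAll_of_not_dvd hd]

-- table lookup: inside Pre_, spf[t] = minFac t
lemma pyGet_table {spf : List Int} (hT : ∀ i : Nat, i < spf.length → 2 ≤ i → spf.getD i 0 = (Nat.minFac i : Int))
    {t : Nat} (h2 : 2 ≤ t) (hlen : t < spf.length) :
    PySem.List.pyGet? spf (t : Int) = some ((Nat.minFac t : Nat) : Int) := by
  rw [PySem.List.pyGet?_natCast]
  rw [List.getElem?_eq_getElem hlen]
  have h := hT t hlen h2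
  rw [List.getD_eq_getElem?_getD, List.getElem?_eq_getElem hlen] at h
  simp only [Option.getD_some] at h
  simp [h]

-- one unfolding step of A's loop when the lookup succeeds
lemma pvLoopA_step {f : Nat} {spf : List Int} {r temp p : Int}
    (ht : 1 < temp) (h : PySem.List.pyGet? spf temp = some p) :
    pvLoopA (f + 1) spf r temp = pvLoopA f spf (r * p) (pvDivOut temp.toNat p temp) := by
  have hstep : pvLoopA (f + 1) spf r temp =
      if 1 < temp then
        (match PySem.List.pyGet? spf temp with
          | none => r
          | some p => pvLoopA f spf (r * p) (pvDivOut temp.toNat p temp))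
      else r := rfl
  rw [hstep, if_pos ht, h]

def pvRad (t : Nat) : Nat := ∏ q ∈ t.primeFactors, q

-- A's outer loop computes result * rad
lemma pvLoopA_eq (fuel : Nat) : ∀ (t : Nat) (r : Int) (spf : List Int),
    (∀ i : Nat, i < spf.length → 2 ≤ i → spf.getD i 0 = (Nat.minFac i : Int)) →
    1 ≤ t → t < spf.length → t ≤ fuel →
    pvLoopA fuel spf r (t : Int) = r * (pvRad t : Int) := by
  induction fuel with
  | zero => intro t r spf _ h1 _ h2; omega
  | succ f ih =>
    intro t r spf hT h1 hlen hf
    by_cases h2 : 2 ≤ t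
    · rw [pvLoopA_step (by exact_mod_cast (by omega : (1:Int) < (t:Int))) (pyGet_table hT h2 hlen)]
      have hp : (Nat.minFac t).Prime := Nat.minFac_prime (by omega)
      have hp2 : 2 ≤ Nat.minFac t := hp.two_le
      have hd : Nat.minFac t ∣ t := Nat.minFac_dvd t
      rw [Int.toNat_natCast t, pvDivOut_eq_stripAll t t (Nat.minFac t) hp2 (by omega) (le_refl t)]
      have hlt : stripAll (Nat.minFac t) t < t := stripAll_lt hp2 (by omega) hd
      have hpos : 0 < stripAll (Nat.minFac t) t := stripAll_pos (by omega)
      rw [ih (stripAll (Nat.minFac t) t) (r * (Nat.minFac t : Int)) spf hT hpos (by omega) (by omega)]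
      have hmem : Nat.minFac t ∈ t.primeFactors := Nat.mem_primeFactors.mpr ⟨hp, hd, by omega⟩
      have hre : pvRad (stripAll (Nat.minFac t) t) = ∏ q ∈ t.primeFactors.erase (Nat.minFac t), q := by
        unfold pvRad
        rw [stripAll_primeFactors hp (by omega)]
      rw [hre]
      unfold pvRad
      rw [← Finset.mul_prod_erase _ _ hmem]
      push_cast
      ring
    · have ht1 : t = 1 := by omega
      subst ht1
      unfold pvLoopA
      rw [if_neg (by norm_num)]
      unfold pvRad
      simp [Nat.primeFactors_one]

-- if every prime factor of t is ≥ d and d*d > t, then t = 1 or t is prime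
lemma pvTailPrime {t d : Nat} (h1 : 1 ≤ t) (hge : ∀ q ∈ t.primeFactors, d ≤ q)
    (hdd : t < d * d) : t = 1 ∨ t.Prime := by
  by_cases h2 : 2 ≤ t
  · right
    by_contra hnp
    have hsq : Nat.minFac t ^ 2 ≤ t := Nat.minFac_sq_le_self (by omega) hnp
    have hp : (Nat.minFac t).Prime := Nat.minFac_prime (by omega)
    have hmem : Nat.minFac t ∈ t.primeFactors :=
      Nat.mem_primeFactors.mpr ⟨hp, Nat.minFac_dvd t, by omega⟩
    have hdq := hge _ hmem
    have : d * d ≤ Nat.minFac t * Nat.minFac t := Nat.mul_le_mul hdq hdq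
    rw [pow_two] at hsq
    omega
  · left; omega

-- one unfolding step of B's loop, three shapes
lemma pvLoopT_step_div {f : Nat} {r d t : Int} (hc : d * d ≤ t) (hm : PySem.Int.mod t d = 0) :
    pvLoopT (f + 1) r d t = pvLoopT f (r * d) (d + 1) (pvDivOut t.toNat d t) := by
  have hstep : pvLoopT (f + 1) r d t =
      if d * d ≤ t then
        (if PySem.Int.mod t d = 0 then
          pvLoopT f (r * d) (d + 1) (pvDivOut t.toNat d t)
        else pvLoopT f r (d + 1) t)
      else (r, t) := rfl
  rw [hstep, if_pos hc, if_pos hm]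

lemma pvLoopT_step_ndiv {f : Nat} {r d t : Int} (hc : d * d ≤ t) (hm : ¬ PySem.Int.mod t d = 0) :
    pvLoopT (f + 1) r d t = pvLoopT f r (d + 1) t := by
  have hstep : pvLoopT (f + 1) r d t =
      if d * d ≤ t then
        (if PySem.Int.mod t d = 0 then
          pvLoopT f (r * d) (d + 1) (pvDivOut t.toNat d t)
        else pvLoopT f r (d + 1) t)
      else (r, t) := rfl
  rw [hstep, if_pos hc, if_neg hm]

lemma pvLoopT_exit {f : Nat} {r d t : Int} (hc : ¬ d * d ≤ t) :
    pvLoopT (f + 1) r d t = (r, t) := by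
  have hstep : pvLoopT (f + 1) r d t =
      if d * d ≤ t then
        (if PySem.Int.mod t d = 0 then
          pvLoopT f (r * d) (d + 1) (pvDivOut t.toNat d t)
        else pvLoopT f r (d + 1) t)
      else (r, t) := rfl
  rw [hstep, if_neg hc]

-- the exited state: t = 1 or t prime, so pvFinish (r, t) = r * pvRad t
lemma pvFinish_done {t d : Nat} {r : Int} (h1 : 1 ≤ t) (hge : ∀ q ∈ t.primeFactors, d ≤ q)
    (hdd : t < d * d) : pvFinish (r, (t : Int)) = r * (pvRad t : Int) := by
  rcases pvTailPrime h1 hge hdd with h | hp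
  · subst h
    unfold pvFinish pvRad
    norm_num [Nat.primeFactors_one]
  · have h2 := hp.two_le
    have hrad : pvRad t = t := by
      unfold pvRad
      rw [hp.primeFactors, Finset.prod_singleton]
    show (if (1 : Int) < (t : Int) then r * (t : Int) else r) = r * (pvRad t : Int)
    rw [if_pos (by exact_mod_cast (by omega : (1 : Int) < (t : Int))), hrad]

-- B's trial-division loop followed by the final multiply computes r * rad t
lemma pvLoopT_eq (fuel : Nat) : ∀ (t d : Nat) (r : Int),
    2 ≤ d → 1 ≤ t → (∀ q ∈ t.primeFactors, d ≤ q) → t + 1 ≤ fuel + d →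
    pvFinish (pvLoopT fuel r (d : Int) (t : Int)) = r * (pvRad t : Int) := by
  induction fuel with
  | zero =>
    intro t d r hd h1 hge hf
    have hdd : t < d * d := by
      have : d ≤ d * d := Nat.le_mul_of_pos_left d (by omega)
      omega
    unfold pvLoopT
    exact pvFinish_done h1 hge hdd
  | succ f ih =>
    intro t d r hd h1 hge hf
    by_cases hdd : d * d ≤ t
    · have hcond : (d : Int) * (d : Int) ≤ (t : Int) := by exact_mod_cast hdd
      by_cases hdvd : d ∣ t
      · -- d is the least prime factor of t here, hence prime
        have h2t : 2 ≤ t := by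
          have : 4 ≤ d * d := Nat.mul_le_mul hd hd
          omega
        have hdm : Nat.minFac t ≤ d := Nat.minFac_le_of_dvd hd hdvd
        have hpmin : (Nat.minFac t).Prime := Nat.minFac_prime (by omega)
        have hmemmin : Nat.minFac t ∈ t.primeFactors :=
          Nat.mem_primeFactors.mpr ⟨hpmin, Nat.minFac_dvd t, by omega⟩
        have heq : Nat.minFac t = d := le_antisymm hdm (hge _ hmemmin)
        have hp : d.Prime := heq ▸ hpmin
        have hmem : d ∈ t.primeFactors := heq ▸ hmemmin
        have hm : PySem.Int.mod (t : Int) (d : Int) = 0 := by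
          rw [PySem.Int.mod_eq_zero_iff_dvd]
          exact_mod_cast hdvd
        rw [pvLoopT_step_div hcond hm, Int.toNat_natCast t,
          pvDivOut_eq_stripAll t t d hd h1 (le_refl t)]
        have hlt : stripAll d t < t := stripAll_lt hd (by omega) hdvd
        have hpos : 0 < stripAll d t := stripAll_pos (by omega)
        have hfac : (stripAll d t).primeFactors = t.primeFactors.erase d :=
          stripAll_primeFactors hp (by omega)
        have hcast : ((d : Int) + 1) = (((d + 1 : Nat)) : Int) := by push_cast; ring
        rw [hcast, ih (stripAll d t) (d + 1) (r * d) (by omega) hpos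
          (by
            intro q hq
            rw [hfac, Finset.mem_erase] at hq
            have := hge q hq.2
            have := hq.1
            omega)
          (by omega)]
        have hre : pvRad (stripAll d t) = ∏ q ∈ t.primeFactors.erase d, q := by
          unfold pvRad
          rw [hfac]
        rw [hre]
        unfold pvRad
        rw [← Finset.mul_prod_erase _ _ hmem]
        push_cast
        ring
      · have hm : ¬ PySem.Int.mod (t : Int) (d : Int) = 0 := by
          rw [PySem.Int.mod_eq_zero_iff_dvd]
          intro h
          exact hdvd (by exact_mod_cast h)
        have hcast : ((d : Int) + 1) = (((d + 1 : Nat)) : Int) := by push_cast; ring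
        rw [pvLoopT_step_ndiv hcond hm, hcast]
        exact ih t (d + 1) r (by omega) h1
          (by
            intro q hq
            have hqge := hge q hq
            rcases Nat.mem_primeFactors.mp hq with ⟨hqp, hqd, _⟩
            have : q ≠ d := by
              intro h; subst h; exact hdvd hqd
            omega)
          (by omega)
    · have hcond : ¬ (d : Int) * (d : Int) ≤ (t : Int) := by exact_mod_cast hdd
      rw [pvLoopT_exit hcond]
      exact pvFinish_done h1 hge (by omega)

-- ===== VERDICT (by name: the statement is the Claim_ definition above) =====
theorem rad_from_spf_spec : Claim_equal_rad_from_spf := by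
  intro n spf _ hpre
  unfold Spec_rad_from_spf rad_from_spf rad_from_spf_alt
  by_cases hn : n ≤ 1
  · simp [hn]
  · rcases hpre with h | ⟨hlen, hT0⟩
    · omega
    · have hT : ∀ i : Nat, i < spf.length → 2 ≤ i → spf.getD i 0 = (Nat.minFac i : Int) := by
        intro i h1 h2
        obtain ⟨hnn, h2p, hdvd, hleast⟩ := hT0 i h1 h2
        have hmf2 : 2 ≤ Nat.minFac i := (Nat.minFac_prime (by omega)).two_le
        have hle : Nat.minFac i ≤ (spf.getD i 0).toNat := Nat.minFac_le_of_dvd h2p hdvd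
        have heq : (spf.getD i 0).toNat = Nat.minFac i := by
          rcases Nat.lt_or_ge (Nat.minFac i) ((spf.getD i 0).toNat) with hlt | hge
          · exact absurd (Nat.minFac_dvd i) (hleast _ hlt hmf2)
          · omega
        omega
      rw [if_neg hn, if_neg hn]
      set t := n.toNat with htdef
      have hcast : (t : Int) = n := Int.toNat_of_nonneg (by omega)
      have ht2 : 2 ≤ t := by omega
      have htlen : t < spf.length := by omega
      rw [← hcast]
      rw [pvLoopA_eq t t 1 spf hT (by omega) htlen (le_refl t)]
      rw [show ((2 : Int)) = (((2 : Nat)) : Int) by norm_num]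
      rw [pvLoopT_eq t t 2 1 (le_refl 2) (by omega)
        (fun q hq => (Nat.mem_primeFactors.mp hq).1.two_le) (by omega)]
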